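-- pv_equiv track=rewrite | github.com/sun-hainan/Python | 40_外部内存算法/external_scan.py | optimize_scan_order
-- ===== SOURCE A (Python) =====
-- def optimize_scan_order(data, block_size):
--
--     """
--
--     优化扫描顺序：按块对齐访问以减少 I/O。
--
--
--
--     参数:
--
--         data: 数据数组
--
--         block_size: 块大小
--
--
--
--     返回:
--
--         处理所需的 I/O 次数
--
--     """
--
--     n = len(data)
--
--     io_count = 0
--
--     current_block = -1
--
--
--
--     for i in range(n):
--
--         expected_block = i // block_size
--
--         if expected_block != current_block:
--
--             io_count += 1
--
--             current_block = expected_block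
--
--
--
--     return io_count
-- ===== SOURCE B (Python) =====
-- def optimize_scan_order(data, block_size):
--     """Closed form: a sequential block-aligned scan touches ceil(n / block_size) blocks."""
--     n = len(data)
--     if n == 0:
--         return 0
--     return -(-n // block_size)
-- ===== Notes on version B (the rewrite author's own statement) =====
-- stated objective: faster
-- what changed: Replaces the O(n) per-element loop that counts block-boundary crossings with the closed form ceil(n/block_size) (0 for empty data).
-- outside the precondition, e.g. on optimize_scan_order([1, 2, 3, 4], -2): A returns 3, B returns -2; on optimize_scan_order([1], 0): A raises ZeroDivisionError, B raises ZeroDivisionError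
import Mathlib
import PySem

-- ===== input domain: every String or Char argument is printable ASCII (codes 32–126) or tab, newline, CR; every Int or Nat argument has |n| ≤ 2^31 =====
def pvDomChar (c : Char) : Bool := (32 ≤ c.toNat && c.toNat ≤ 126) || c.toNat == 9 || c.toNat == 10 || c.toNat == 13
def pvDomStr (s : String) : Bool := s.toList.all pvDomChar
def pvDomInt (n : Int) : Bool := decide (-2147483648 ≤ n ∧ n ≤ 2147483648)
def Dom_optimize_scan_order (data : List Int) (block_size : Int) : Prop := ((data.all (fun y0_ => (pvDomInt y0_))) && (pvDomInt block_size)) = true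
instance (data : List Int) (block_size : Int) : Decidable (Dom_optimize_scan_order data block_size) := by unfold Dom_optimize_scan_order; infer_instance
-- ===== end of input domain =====

-- B replaces A's per-element loop by the closed form ceil(n/block_size); objective: faster (O(1) vs O(n)).

-- ===== PORT A =====
-- loop over range(n), state (io_count, current_block)
def optimize_scan_order (data : List Int) (block_size : Int) : Int :=
  ((PySem.List.pyRange 0 (data.length : Int) 1).foldl
    (fun s i =>
      let expected_block := PySem.Int.floordiv i block_size
      if expected_block ≠ s.2 then (s.1 + 1, expected_block) else s)
    (0, -1)).1

-- ===== PORT B =====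
def optimize_scan_order_alt (data : List Int) (block_size : Int) : Int :=
  if (data.length : Int) = 0 then 0
  else -(PySem.Int.floordiv (-(data.length : Int)) block_size)

-- ===== PRECONDITION & SPEC =====
-- Pre_ restricts to the natural domain of a block size: block_size = 0 makes A raise
-- ZeroDivisionError on nonempty data, and a negative block_size is outside the natural
-- domain (A returns on it, but a negative I/O block size is meaningless; B differs there).
def Pre_optimize_scan_order (data : List Int) (block_size : Int) : Prop :=
  0 < block_size ∨ data = []
instance (data : List Int) (block_size : Int) : Decidable (Pre_optimize_scan_order data block_size) := by
  unfold Pre_optimize_scan_order; infer_instance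

def pvWitness_optimize_scan_order : List Int × Int := ([5, 6, 7, 8, 9], 2)

def Spec_optimize_scan_order (data : List Int) (block_size : Int) (out : Int) : Prop :=
  out = optimize_scan_order_alt data block_size
instance (data : List Int) (block_size : Int) (out : Int) : Decidable (Spec_optimize_scan_order data block_size out) := by
  unfold Spec_optimize_scan_order; infer_instance

-- ===== CLAIM (what is proved, stated in full; the proofs are below) =====
def Claim_equal_optimize_scan_order : Prop := ∀ (data : List Int) (block_size : Int), Dom_optimize_scan_order data block_size → Pre_optimize_scan_order data block_size → Spec_optimize_scan_order data block_size (optimize_scan_order data block_size)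

-- ===== LEMMAS AND PROOFS =====

-- Loop invariant: after scanning range(n) the state is (ceil-style: (n-1)//b + 1, (n-1)//b).
theorem scan_loop_state (b : Int) (hb : 0 < b) (n : Nat) :
    ((PySem.List.pyRange 0 (n : Int) 1).foldl
      (fun s i =>
        let expected_block := PySem.Int.floordiv i b
        if expected_block ≠ s.2 then (s.1 + 1, expected_block) else s)
      ((0 : Int), (-1 : Int)))
    = if n = 0 then ((0 : Int), (-1 : Int))
      else (PySem.Int.floordiv ((n : Int) - 1) b + 1, PySem.Int.floordiv ((n : Int) - 1) b) := by
  induction n with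
  | zero => simp [PySem.List.pyRange_one_eq_nil]
  | succ m ih =>
    have hstep : PySem.List.pyRange 0 ((m + 1 : Nat) : Int) 1
        = PySem.List.pyRange 0 (m : Int) 1 ++ [(m : Int)] := by
      push_cast
      exact PySem.List.pyRange_one_succ_right (by exact_mod_cast Nat.zero_le m)
    rw [hstep, List.foldl_append, ih]
    rcases Nat.eq_zero_or_pos m with hm | hm
    · subst hm
      have h0 : PySem.Int.floordiv 0 b = 0 := by
        rw [PySem.Int.floordiv_eq_iff_of_pos hb]; omega
      simp [h0]
    · have hm1 : (1:Int) ≤ (m:Int) := by exact_mod_cast hm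
      have hm0 : m ≠ 0 := by omega
      rw [if_neg hm0, if_neg (Nat.succ_ne_zero m)]
      set q := PySem.Int.floordiv ((m : Int) - 1) b with hq
      have hqb : q * b ≤ (m:Int) - 1 ∧ (m:Int) - 1 < (q + 1) * b :=
        (PySem.Int.floordiv_eq_iff_of_pos hb).mp hq.symm
      by_cases hcase : (m:Int) < (q + 1) * b
      · have hfq : PySem.Int.floordiv (((m + 1 : Nat) : Int) - 1) b = q := by
          rw [PySem.Int.floordiv_eq_iff_of_pos hb]; push_cast; omega
        have hfq' : PySem.Int.floordiv (m : Int) b = q := by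
          rw [PySem.Int.floordiv_eq_iff_of_pos hb]; omega
        simp [hfq']
      · have hm_eq : (m:Int) = (q + 1) * b := by omega
        have hfq' : PySem.Int.floordiv (m : Int) b = q + 1 := by
          rw [PySem.Int.floordiv_eq_iff_of_pos hb]
          constructor
          · omega
          · nlinarith
        have hfq : PySem.Int.floordiv (((m + 1 : Nat) : Int) - 1) b = q + 1 := by
          rw [show ((m + 1 : Nat) : Int) - 1 = (m:Int) by push_cast; ring]
          exact hfq'
        have hne : q + 1 ≠ q := by omega
        simp [hfq', hne]

-- ===== VERDICT (by name: the statement is the Claim_ definition above) =====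
theorem optimize_scan_order_spec : Claim_equal_optimize_scan_order := by
  intro data b _ hpre
  unfold Spec_optimize_scan_order optimize_scan_order optimize_scan_order_alt
  rcases hpre with hb | hnil
  · rw [scan_loop_state b hb data.length]
    rcases Nat.eq_zero_or_pos data.length with h0 | hpos
    · simp [h0]
    · rw [if_neg hpos.ne', if_neg (by exact_mod_cast hpos.ne' : ¬ ((data.length : Int) = 0))]
      set q := PySem.Int.floordiv ((data.length : Int) - 1) b with hq
      have hqb : q * b ≤ (data.length : Int) - 1 ∧ (data.length : Int) - 1 < (q + 1) * b :=
        (PySem.Int.floordiv_eq_iff_of_pos hb).mp hq.symm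
      have : -(PySem.Int.floordiv (-(data.length : Int)) b) = q + 1 := by
        rw [PySem.Int.neg_floordiv_neg_eq_iff_of_pos hb]
        constructor <;> nlinarith [hqb.1, hqb.2]
      simp [this]
  · subst hnil
    simp [PySem.List.pyRange_one_eq_nil]
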